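-- pv_equiv track=rewrite | github.com/f16junsu/BaekJoonOnlineSolved | LV7/Q7-10.py | ifgroup
-- ===== SOURCE A (Python) =====
-- def ifgroup(stri: str):
--     ls_alpahs = []
--     seq = 0
--     try:
--         for i in range(len(stri)):
--             if seq:
--                 if stri[i + 1] == stri[i]:
--                     seq = 1
--                 else:
--                     seq = 0
--             else:
--                 if stri[i] in ls_alpahs:
--                     return False
--                 else:
--                     ls_alpahs.append(stri[i])
--                     if stri[i + 1] == stri[i]:
--                         seq = 1
--     except IndexError:
--         return True
-- ===== SOURCE B (Python) =====
-- def ifgroup(stri: str):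
--     comp = []
--     for c in stri:
--         if not comp or comp[-1] != c:
--             comp.append(c)
--     return len(comp) == len(set(comp))
-- ===== Notes on version B (the rewrite author's own statement) =====
-- stated objective: simpler
-- what changed: Replaces the index/lookahead loop with IndexError-driven termination and an early-return duplicate scan by a plain run-length compression pass followed by a separate distinctness check (len(comp) == len(set(comp))).
-- outside the precondition, e.g. on ifgroup(''): A returns None, B returns True
import Mathlib
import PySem

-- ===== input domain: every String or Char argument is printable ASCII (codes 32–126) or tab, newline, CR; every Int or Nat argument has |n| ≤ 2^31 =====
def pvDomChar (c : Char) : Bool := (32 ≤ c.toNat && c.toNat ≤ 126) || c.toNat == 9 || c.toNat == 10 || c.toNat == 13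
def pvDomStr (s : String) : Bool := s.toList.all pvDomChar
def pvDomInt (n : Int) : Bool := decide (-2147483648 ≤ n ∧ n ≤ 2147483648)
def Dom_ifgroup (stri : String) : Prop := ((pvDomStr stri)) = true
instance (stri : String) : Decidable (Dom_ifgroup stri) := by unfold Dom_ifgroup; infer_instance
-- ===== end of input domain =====

-- B replaces A's lookahead loop (IndexError-driven exit, early duplicate return) by a run-length
-- compression pass followed by a separate distinctness check; objective: simpler.

-- ===== PORT A =====
-- A's for-loop with lookahead stri[i+1], transcribed as structural recursion over the character list
-- with the same state (ls_alpahs, seq); the cases where stri[i+1] raises IndexError (current char is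
-- the last one) return True exactly where Python's `except IndexError: return True` fires.
def ifgroupLoop : List Char → List Char → Bool → Bool
  | [], _, _ => true          -- loop body never runs: only for "" (Python returns None; excluded by Pre_)
  | [c], ls, seq =>
      if seq then true        -- stri[i+1] raises IndexError → return True
      else if ls.contains c then false
      else true               -- after appending, stri[i+1] raises IndexError → return True
  | c :: c' :: rest, ls, seq =>
      if seq then ifgroupLoop (c' :: rest) ls (c' == c)
      else if ls.contains c then false
      else ifgroupLoop (c' :: rest) (ls ++ [c]) (c' == c)

def ifgroup (stri : String) : Bool := ifgroupLoop stri.toList [] false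

-- ===== PORT B =====
def ifgroup_alt (stri : String) : Bool :=
  let comp := stri.toList.foldl
    (fun comp c => if comp = [] ∨ comp.getLast? ≠ some c then comp ++ [c] else comp) []
  comp.length == (PySem.Set.ofList comp).length

-- ===== PRECONDITION & SPEC =====
-- Pre_ excludes only the empty string, on which Python A returns None, not a bool.
def Pre_ifgroup (stri : String) : Prop := stri ≠ ""
instance (stri : String) : Decidable (Pre_ifgroup stri) := by unfold Pre_ifgroup; infer_instance
def pvWitness_ifgroup : String := "aabba"

def Spec_ifgroup (stri : String) (out : Bool) : Prop := out = ifgroup_alt stri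
instance (stri : String) (out : Bool) : Decidable (Spec_ifgroup stri out) := by unfold Spec_ifgroup; infer_instance

-- ===== CLAIM (what is proved, stated in full; the proofs are below) =====
def Claim_equal_ifgroup : Prop := ∀ (stri : String), Dom_ifgroup stri → Pre_ifgroup stri → Spec_ifgroup stri (ifgroup stri)

-- ===== LEMMAS AND PROOFS =====

-- run-length compression, head-recursive form (prev = last emitted char)
def rcomp : Option Char → List Char → List Char
  | _, [] => []
  | prev, c :: rest => if prev = some c then rcomp prev rest else c :: rcomp (some c) rest

-- the duplicate scan A performs on the block-leading letters
def chk : List Char → List Char → Bool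
  | _, [] => true
  | ls, c :: rest => if ls.contains c then false else chk (ls ++ [c]) rest

theorem foldl_comp_eq_rcomp (cs : List Char) (acc : List Char) :
    cs.foldl (fun comp c => if comp = [] ∨ comp.getLast? ≠ some c then comp ++ [c] else comp) acc
      = acc ++ rcomp acc.getLast? cs := by
  induction cs generalizing acc with
  | nil => simp [rcomp]
  | cons c cs ih =>
    by_cases h : acc.getLast? = some c
    · have hne : acc ≠ [] := by intro hn; simp [hn] at h
      simp [List.foldl_cons, rcomp, h, hne, ih]
    · have : (acc = [] ∨ acc.getLast? ≠ some c) := Or.inr h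
      simp only [List.foldl_cons, if_pos this, rcomp, if_neg (by simpa [eq_comm] using h)]
      rw [ih]
      simp

theorem ifgroupLoop_eq_chk (rest : List Char) :
    ∀ (c prev : Char) (ls : List Char),
      ifgroupLoop (c :: rest) ls (c == prev) = chk ls (rcomp (some prev) (c :: rest)) := by
  induction rest with
  | nil =>
    intro c prev ls
    by_cases h : c = prev
    · simp [ifgroupLoop, rcomp, chk, h]
    · simp [ifgroupLoop, rcomp, chk, h, Ne.symm h]
  | cons c' r ih =>
    intro c prev ls
    by_cases h : c = prev
    · simp [ifgroupLoop, rcomp, h, ih]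
    · simp [ifgroupLoop, rcomp, chk, h, Ne.symm h, ih]

theorem ifgroupLoop_start (c : Char) (rest : List Char) :
    ifgroupLoop (c :: rest) [] false = chk [] (rcomp none (c :: rest)) := by
  cases rest with
  | nil => simp [ifgroupLoop, rcomp, chk]
  | cons c' r =>
    have := ifgroupLoop_eq_chk r c' c [c]
    simp [ifgroupLoop, rcomp, chk, this]

theorem chk_eq_true_iff (l : List Char) : ∀ ls : List Char,
    chk ls l = true ↔ (l.Nodup ∧ ∀ x ∈ l, x ∉ ls) := by
  induction l with
  | nil => intro ls; simp [chk]
  | cons c r ih =>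
    intro ls
    by_cases h : ls.contains c
    · have hc : c ∈ ls := by simpa using h
      simp only [chk, if_pos h, Bool.false_eq_true, false_iff, not_and]
      intro _ hd
      exact absurd hc (hd c List.mem_cons_self)
    · have hc : c ∉ ls := by simpa using h
      simp only [chk, if_neg h, ih]
      constructor
      · rintro ⟨hnd, hd⟩
        refine ⟨List.nodup_cons.mpr ⟨fun hcr => (hd c hcr) (by simp), hnd⟩, ?_⟩
        intro x hx
        rcases List.mem_cons.mp hx with rfl | hx'
        · exact hc
        · exact fun hxl => (hd x hx') (by simp [hxl])
      · rintro ⟨hnd, hd⟩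
        obtain ⟨hcr, hr⟩ := List.nodup_cons.mp hnd
        refine ⟨hr, fun x hx hxm => ?_⟩
        rcases List.mem_append.mp hxm with hxl | hxc
        · exact (hd x (List.mem_cons_of_mem _ hx)) hxl
        · have hxe : x = c := by simpa using hxc
          subst hxe; exact hcr hx

theorem ofList_sublist (l : List Char) : List.Sublist (PySem.Set.ofList l) l := by
  have key : ∀ (l acc : List Char), List.Sublist (l.foldl PySem.Set.add acc) (acc ++ l) := by
    intro l
    induction l with
    | nil => intro acc; simp
    | cons c r ih =>
      intro acc
      refine (ih (PySem.Set.add acc c)).trans ?_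
      by_cases h : acc.contains c
      · simp only [PySem.Set.add, PySem.Set.contains, if_pos h]
        exact (List.append_sublist_append_left acc).mpr (List.sublist_cons_self c r)
      · simp only [PySem.Set.add, PySem.Set.contains, if_neg h, List.append_assoc,
          List.singleton_append, List.Sublist.refl]
  simpa using key l []

theorem length_ofList_eq_iff (l : List Char) :
    ((PySem.Set.ofList l).length = l.length) ↔ l.Nodup := by
  constructor
  · intro h
    have := (ofList_sublist l).eq_of_length h
    rw [← this]
    exact PySem.Set.nodup_ofList l
  · intro h
    rw [PySem.Set.ofList_eq_self_of_nodup _ h]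

-- ===== VERDICT (by name: the statement is the Claim_ definition above) =====
theorem ifgroup_spec : Claim_equal_ifgroup := by
  intro stri _ hpre
  unfold Spec_ifgroup ifgroup ifgroup_alt
  rw [foldl_comp_eq_rcomp]
  simp only [List.getLast?_nil, List.nil_append]
  cases hcs : stri.toList with
  | nil =>
    exact absurd (String.toList_eq_nil_iff.mp hcs) hpre
  | cons c rest =>
    rw [ifgroupLoop_start]
    rcases h : chk [] (rcomp none (c :: rest)) with _ | _
    · have hnd : ¬ (rcomp none (c :: rest)).Nodup := by
        intro hnd
        have := (chk_eq_true_iff (rcomp none (c :: rest)) []).mpr ⟨hnd, by simp⟩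
        rw [h] at this; cases this
      have hne : (PySem.Set.ofList (rcomp none (c :: rest))).length ≠ (rcomp none (c :: rest)).length :=
        fun he => hnd ((length_ofList_eq_iff _).mp he)
      symm
      simp only [beq_eq_false_iff_ne]
      exact hne.symm
    · have hnd := ((chk_eq_true_iff (rcomp none (c :: rest)) []).mp h).1
      symm
      simp only [beq_iff_eq]
      exact ((length_ofList_eq_iff _).mpr hnd).symm
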